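-- pv_equiv track=rewrite | github.com/only-romano/junkyard | now/slots/print_patterns.py | _get_old_value_and_time
-- ===== SOURCE A (Python) =====
-- def _get_old_value_and_time(value, slots):
--     result = value
--     time = 1
--     if not result:
--         time = 0
--         for item in reversed(slots):
--             time += 1
--             if item:
--                 result = item
--                 break
--     return result, time
-- ===== SOURCE B (Python) =====
-- def _get_old_value_and_time(value, slots):
--     if value:
--         return value, 1
--     last = -1
--     found = value
--     for i, item in enumerate(slots):
--         if item:
--             last = i
--             found = item
--     if last >= 0:
--         return found, len(slots) - last
--     return value, len(slots)
-- ===== Notes on version B (the rewrite author's own statement) =====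
-- stated objective: alternative
-- what changed: Replaces the reversed early-break scan with a single forward pass that records the last truthy index and value, computing the time arithmetically as len(slots) - last (or len(slots) when none is truthy).
import Mathlib
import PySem

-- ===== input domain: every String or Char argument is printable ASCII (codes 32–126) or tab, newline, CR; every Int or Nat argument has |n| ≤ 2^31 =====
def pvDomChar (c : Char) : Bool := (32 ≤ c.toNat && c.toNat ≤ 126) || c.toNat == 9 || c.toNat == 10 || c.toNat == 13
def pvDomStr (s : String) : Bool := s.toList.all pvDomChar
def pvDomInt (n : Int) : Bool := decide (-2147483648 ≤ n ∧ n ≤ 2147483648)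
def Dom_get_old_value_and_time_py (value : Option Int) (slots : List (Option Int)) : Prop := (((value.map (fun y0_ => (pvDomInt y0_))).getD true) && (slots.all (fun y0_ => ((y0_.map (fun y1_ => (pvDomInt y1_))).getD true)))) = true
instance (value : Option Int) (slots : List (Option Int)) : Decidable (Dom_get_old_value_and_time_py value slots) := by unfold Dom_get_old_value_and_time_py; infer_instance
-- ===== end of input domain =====

-- ===== PORT A =====
-- header: B keeps A's return values but scans slots forward once, tracking the last
-- truthy index, instead of A's reversed early-break scan (alternative decomposition).
def pvTruthy (o : Option Int) : Bool :=
  match o with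
  | none => false
  | some n => decide (n ≠ 0)

def pvALoop (value : Option Int) : List (Option Int) → Int → Option Int × Int
  | [], t => (value, t)
  | x :: rest, t => if pvTruthy x then (x, t + 1) else pvALoop value rest (t + 1)

def get_old_value_and_time_py (value : Option Int) (slots : List (Option Int)) : Option Int × Int :=
  if pvTruthy value then (value, 1) else pvALoop value slots.reverse 0

-- ===== PORT B =====
def pvBLoop : List (Option Int) → Int → Int × Option Int → Int × Option Int
  | [], _, st => st
  | x :: rest, i, st => if pvTruthy x then pvBLoop rest (i + 1) (i, x) else pvBLoop rest (i + 1) st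

def get_old_value_and_time_py_alt (value : Option Int) (slots : List (Option Int)) : Option Int × Int :=
  if pvTruthy value then (value, 1)
  else
    let st := pvBLoop slots 0 (-1, value)
    if st.1 ≥ 0 then (st.2, (slots.length : Int) - st.1) else (value, (slots.length : Int))

-- ===== PRECONDITION & SPEC =====
def Spec_get_old_value_and_time_py (value : Option Int) (slots : List (Option Int)) (out : Option Int × Int) : Prop := out = get_old_value_and_time_py_alt value slots
instance (value : Option Int) (slots : List (Option Int)) (out : Option Int × Int) : Decidable (Spec_get_old_value_and_time_py value slots out) := by unfold Spec_get_old_value_and_time_py; infer_instance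

-- ===== CLAIM (what is proved, stated in full; the proofs are below) =====
def Claim_equal_get_old_value_and_time_py : Prop := ∀ (value : Option Int) (slots : List (Option Int)), Dom_get_old_value_and_time_py value slots → Spec_get_old_value_and_time_py value slots (get_old_value_and_time_py value slots)

-- ===== LEMMAS AND PROOFS =====

theorem pvALoop_shift (v : Option Int) (rl : List (Option Int)) (t : Int) :
    pvALoop v rl t = ((pvALoop v rl 0).1, (pvALoop v rl 0).2 + t) := by
  induction rl generalizing t with
  | nil => simp [pvALoop]
  | cons x rest ih =>
    by_cases h : pvTruthy x = true
    · simp [pvALoop, h]; ring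
    · simp only [pvALoop, h, Bool.false_eq_true, if_false]
      rw [ih (t + 1), ih (0 + 1)]
      simp; ring

theorem pvBLoop_append (l : List (Option Int)) (x : Option Int) (i : Int) (st : Int × Option Int) :
    pvBLoop (l ++ [x]) i st =
      if pvTruthy x then (i + (l.length : Int), x) else pvBLoop l i st := by
  induction l generalizing i st with
  | nil => by_cases h : pvTruthy x = true <;> simp [pvBLoop, h]
  | cons y rest ih =>
    by_cases hy : pvTruthy y = true
    · simp only [List.cons_append, pvBLoop, hy, if_pos, ih]
      by_cases h : pvTruthy x = true <;> simp [h] <;> ring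
    · simp only [List.cons_append, pvBLoop, hy, Bool.false_eq_true, if_false, ih]
      by_cases h : pvTruthy x = true <;> simp [h] <;> ring

theorem pv_main (v : Option Int) (slots : List (Option Int)) :
    pvALoop v slots.reverse 0 =
      (let st := pvBLoop slots 0 (-1, v);
       if st.1 ≥ 0 then (st.2, (slots.length : Int) - st.1) else (v, (slots.length : Int))) := by
  induction slots using List.reverseRecOn with
  | nil => simp [pvALoop, pvBLoop]
  | append_singleton l x ih =>
    rw [List.reverse_append]
    simp only [List.reverse_singleton, List.singleton_append, pvBLoop_append, List.length_append,
      List.length_singleton]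
    by_cases h : pvTruthy x = true
    · simp only [pvALoop, h, if_pos]
      simp
    · simp only [pvALoop, h, Bool.false_eq_true, if_false]
      rw [pvALoop_shift, ih]
      set st := pvBLoop l 0 (-1, v) with hst
      by_cases hge : st.1 ≥ 0
      · simp [hge]; try ring
      · simp [hge]; try ring


-- ===== VERDICT (by name: the statement is the Claim_ definition above) =====
theorem get_old_value_and_time_py_spec : Claim_equal_get_old_value_and_time_py := by
  intro value slots _
  unfold Spec_get_old_value_and_time_py get_old_value_and_time_py get_old_value_and_time_py_alt
  by_cases hv : pvTruthy value = true
  · simp [hv]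
  · simp only [hv, Bool.false_eq_true, if_false]
    exact pv_main value slots
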